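-- pv_equiv track=rewrite | github.com/William-Shearer/SolarBrowser | project.py | list_moons
-- ===== SOURCE A (Python) =====
-- def list_moons(t_planet):
--     """
--     This subroutine recovers the names of the moons from the API.
--     Formats the dinformation to be tabulated, so that it does not
--     make a long list in the console after execution.
--     """
--     moon_list = list()
--     temp_list = list()
--     if t_planet["moons"] == None:
--         return None
--     else:
--         len_moons = len(t_planet["moons"])
--         if len_moons > 5:
--             if (len_moons % 5) != 0:
--                 mn_iter = (int(len_moons / 5) * 5) + 5
--             else:
--                 mn_iter = len_moons
--         else:
--             mn_iter = 5
--
--         for i in range(mn_iter):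
--             """
--             Creates five columns, with as many rows as needed, for
--             the names of the moons to be efficiently tabulated.
--             """
--             if i < len_moons:
--                 temp_list.append(f"{i + 1}.\t{t_planet['moons'][i]['moon']}".expandtabs(4))
--             else:
--                 temp_list.append("-")
--
--             if ((i + 1) % 5) == 0:
--                 moon_list.append(temp_list.copy())
--                 temp_list.clear()
--
--         return moon_list
-- ===== SOURCE B (Python) =====
-- def list_moons(t_planet):
--     """Build the cells flat, pad to a multiple of five, then slice into rows."""
--     moons = t_planet["moons"]
--     if moons == None:
--         return None
--     n = len(moons)
--     cells = [f"{i + 1}.\t{moons[i]['moon']}".expandtabs(4) for i in range(n)]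
--     total = max(5, -(-n // 5) * 5)
--     cells += ["-"] * (total - n)
--     return [cells[j:j + 5] for j in range(0, total, 5)]
-- ===== Notes on version B (the rewrite author's own statement) =====
-- stated objective: simpler
-- what changed: Replaces the index loop with a running temp buffer and modulo-5 flush logic by a three-phase build: a flat comprehension of formatted cells, arithmetic padding to the next multiple of five, and slicing into rows.
import Mathlib
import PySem

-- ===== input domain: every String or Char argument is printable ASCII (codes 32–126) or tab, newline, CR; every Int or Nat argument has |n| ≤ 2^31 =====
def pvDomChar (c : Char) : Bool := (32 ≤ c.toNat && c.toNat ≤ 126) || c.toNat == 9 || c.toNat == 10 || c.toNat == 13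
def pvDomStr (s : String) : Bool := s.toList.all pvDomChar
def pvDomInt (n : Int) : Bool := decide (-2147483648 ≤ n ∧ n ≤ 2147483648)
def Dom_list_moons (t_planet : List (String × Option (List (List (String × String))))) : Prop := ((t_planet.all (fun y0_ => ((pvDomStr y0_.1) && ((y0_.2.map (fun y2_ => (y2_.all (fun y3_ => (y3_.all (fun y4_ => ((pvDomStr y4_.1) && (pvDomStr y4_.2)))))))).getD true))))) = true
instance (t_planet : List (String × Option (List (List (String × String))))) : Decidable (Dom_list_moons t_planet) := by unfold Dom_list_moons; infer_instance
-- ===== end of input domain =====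

-- B builds the formatted cells flat, pads to a multiple of five, then slices rows,
-- replacing A's running temp buffer with modulo-5 flushes; return values agree on Pre_ (simpler decomposition, no speed claim).

-- ===== PORT A =====
-- Hand port of str.expandtabs(4) (no PySem primitive): exact on all characters —
-- a tab advances the column to the next multiple of 4, '\n'/'\r' reset it to 0.
def expandTabs4Aux (col : Nat) : List Char → List Char
  | [] => []
  | c :: rest =>
    if c = '\t' then
      let pad := 4 - col % 4
      List.replicate pad ' ' ++ expandTabs4Aux (col + pad) rest
    else if c = '\n' ∨ c = '\r' then c :: expandTabs4Aux 0 rest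
    else c :: expandTabs4Aux (col + 1) rest

def expandTabs4 (s : String) : String := String.ofList (expandTabs4Aux 0 s.toList)

-- f"{i + 1}.\t{moons[i]['moon']}".expandtabs(4) — the identical expression in A and B
def moonCell (ms : List (List (String × String))) (i : Nat) : String :=
  expandTabs4 (String.ofList ((PySem.Int.toStr ((i : Int) + 1)).toList ++ '.' :: '\t' :: (((ms.getD i []).lookup "moon").getD "").toList))

def list_moons (t_planet : List (String × Option (List (List (String × String))))) : Option (List (List String)) :=
  match t_planet.lookup "moons" with
  | none => none          -- KeyError in Python: excluded by Pre_
  | some none => none     -- t_planet["moons"] == None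
  | some (some ms) =>
    let len_moons := ms.length
    let mn_iter := if len_moons > 5 then
        (if len_moons % 5 ≠ 0 then len_moons / 5 * 5 + 5 else len_moons)
      else 5
    let st := (List.range mn_iter).foldl
      (fun (st : List (List String) × List String) i =>
        let temp := st.2 ++ [if i < len_moons then moonCell ms i else "-"]
        if (i + 1) % 5 = 0 then (st.1 ++ [temp], []) else (st.1, temp))
      ([], [])
    some st.1

-- ===== PORT B =====
def list_moons_alt (t_planet : List (String × Option (List (List (String × String))))) : Option (List (List String)) :=
  match t_planet.lookup "moons" with
  | none => none          -- KeyError in Python: excluded by Pre_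
  | some none => none
  | some (some ms) =>
    let n := ms.length
    let cells := (List.range n).map (moonCell ms)
    let total : Int := max 5 (-(PySem.Int.floordiv (-(n : Int)) 5) * 5)
    let padded := cells ++ List.replicate (total - (n : Int)).toNat "-"
    some ((PySem.List.pyRange 0 total 5).map
      (fun j => PySem.List.slice padded (some j) (some (j + 5))))

-- ===== PRECONDITION & SPEC =====
-- Pre_ excludes exactly the KeyError inputs: no "moons" key, or a moon dict without a "moon" key.
def Pre_list_moons (t_planet : List (String × Option (List (List (String × String))))) : Prop :=
  (t_planet.lookup "moons").isSome = true ∧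
  ∀ ms ∈ (t_planet.lookup "moons").getD none, ∀ m ∈ ms, (m.lookup "moon").isSome = true
instance (t_planet : List (String × Option (List (List (String × String))))) : Decidable (Pre_list_moons t_planet) := by unfold Pre_list_moons; infer_instance

def pvWitness_list_moons : (List (String × Option (List (List (String × String))))) :=
  [("moons", some [[("moon", "Io")], [("moon", "Europa")]])]

def Spec_list_moons (t_planet : List (String × Option (List (List (String × String))))) (out : Option (List (List String))) : Prop := out = list_moons_alt t_planet
instance (t_planet : List (String × Option (List (List (String × String))))) (out : Option (List (List String))) : Decidable (Spec_list_moons t_planet out) := by unfold Spec_list_moons; infer_instance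

-- ===== CLAIM (what is proved, stated in full; the proofs are below) =====
def Claim_equal_list_moons : Prop := ∀ (t_planet : List (String × Option (List (List (String × String))))), Dom_list_moons t_planet → Pre_list_moons t_planet → Spec_list_moons t_planet (list_moons t_planet)

-- ===== LEMMAS AND PROOFS =====

-- the padded flat cell list is one map over range mn_iter
lemma map_range_ite {α : Type} (f : Nat → α) (d : α) (n m : Nat) (h : n ≤ m) :
    (List.range m).map (fun i => if i < n then f i else d)
      = (List.range n).map f ++ List.replicate (m - n) d := by
  obtain ⟨k, rfl⟩ := Nat.exists_eq_add_of_le h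
  rw [List.range_add, List.map_append, List.map_map]
  congr 1
  · exact List.map_congr_left (fun i hi => by
      simp [List.mem_range] at hi; simp [hi])
  · rw [Nat.add_sub_cancel_left, List.eq_replicate_iff]
    constructor
    · simp
    · intro b hb
      simp only [List.mem_map, Function.comp] at hb
      obtain ⟨j, _, hj⟩ := hb
      simpa [Nat.not_lt.mpr (Nat.le_add_right n j)] using hj.symm

-- A's fold over range (5*k) produces the chunked rows
lemma foldA_chunks (g : Nat → String) (k : Nat) :
    (List.range (5 * k)).foldl
      (fun (st : List (List String) × List String) i =>
        let temp := st.2 ++ [g i]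
        if (i + 1) % 5 = 0 then (st.1 ++ [temp], []) else (st.1, temp))
      ([], [])
    = ((List.range k).map (fun r => [g (5*r), g (5*r+1), g (5*r+2), g (5*r+3), g (5*r+4)]), []) := by
  induction k with
  | zero => simp
  | succ k ih =>
    have h5 : 5 * (k + 1) = 5 * k + 1 + 1 + 1 + 1 + 1 := by omega
    rw [h5, List.range_succ, List.range_succ, List.range_succ, List.range_succ, List.range_succ,
        List.foldl_append, List.foldl_append, List.foldl_append, List.foldl_append,
        List.foldl_append, ih]
    have m1 : (5 * k + 1) % 5 = 1 := by omega
    have m2 : (5 * k + 1 + 1) % 5 = 2 := by omega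
    have m3 : (5 * k + 1 + 1 + 1) % 5 = 3 := by omega
    have m4 : (5 * k + 1 + 1 + 1 + 1) % 5 = 4 := by omega
    have m5 : (5 * k + 1 + 1 + 1 + 1 + 1) % 5 = 0 := by omega
    simp only [List.foldl_cons, List.foldl_nil, m1, m2, m3, m4, m5]
    norm_num [List.range_succ]

-- B's slice of the flat map over range (5*k) is one chunked row
lemma slice_map_range (g : Nat → String) (k r : Nat) (hr : r < k) :
    List.take 5 (List.drop (5 * r) ((List.range (5 * k)).map g))
      = [g (5*r), g (5*r+1), g (5*r+2), g (5*r+3), g (5*r+4)] := by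
  have hlen : 5 * r + 5 ≤ 5 * k := by omega
  have : ∀ j, j < 5 → (List.take 5 (List.drop (5 * r) ((List.range (5 * k)).map g)))[j]? = some (g (5*r+j)) := by
    intro j hj
    rw [List.getElem?_take_of_lt hj, List.getElem?_drop, List.getElem?_map,
        List.getElem?_range (by omega)]
    rfl
  have hl : (List.take 5 (List.drop (5 * r) ((List.range (5 * k)).map g))).length = 5 := by
    simp; omega
  apply List.ext_getElem?
  intro j
  by_cases hj : j < 5
  · rw [this j hj]
    interval_cases j <;> rfl
  · rw [List.getElem?_eq_none (by omega), List.getElem?_eq_none (by simp at hj ⊢; omega)]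

-- the main per-moons-list equality
lemma branch_eq (ms : List (List (String × String))) :
    (let len_moons := ms.length
     let mn_iter := if len_moons > 5 then
         (if len_moons % 5 ≠ 0 then len_moons / 5 * 5 + 5 else len_moons)
       else 5
     let st := (List.range mn_iter).foldl
       (fun (st : List (List String) × List String) i =>
         let temp := st.2 ++ [if i < len_moons then moonCell ms i else "-"]
         if (i + 1) % 5 = 0 then (st.1 ++ [temp], []) else (st.1, temp))
       ([], [])
     st.1)
    = (let n := ms.length
       let cells := (List.range n).map (moonCell ms)
       let total : Int := max 5 (-(PySem.Int.floordiv (-(n : Int)) 5) * 5)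
       let padded := cells ++ List.replicate (total - (n : Int)).toNat "-"
       (PySem.List.pyRange 0 total 5).map
         (fun j => PySem.List.slice padded (some j) (some (j + 5)))) := by
  simp only
  set n := ms.length with hn
  set mA := if n > 5 then (if n % 5 ≠ 0 then n / 5 * 5 + 5 else n) else 5 with hmA
  -- arithmetic: B's total equals A's mn_iter, and both are 5 * (mA / 5)
  have hfd : PySem.Int.floordiv (-(n : Int)) 5 = (-(n : Int)) / 5 :=
    PySem.Int.floordiv_eq_ediv_of_pos (by norm_num)
  have hdvd : mA % 5 = 0 ∧ n ≤ mA ∧ 5 ≤ mA := by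
    rw [hmA]; split_ifs <;> omega
  obtain ⟨k, hk⟩ : ∃ k, mA = 5 * k := ⟨mA / 5, by omega⟩
  have htot : max 5 (-((-(n : Int)) / 5) * 5) = (mA : Int) := by
    rw [hmA]; split_ifs <;> omega
  rw [hfd, htot]
  have hpad : (List.range n).map (moonCell ms)
      ++ List.replicate (((mA : Int) - (n : Int)).toNat) "-"
      = (List.range mA).map (fun i => if i < n then moonCell ms i else "-") := by
    rw [show ((mA : Int) - (n : Int)).toNat = mA - n by omega,
       map_range_ite (moonCell ms) "-" n mA hdvd.2.1]
  rw [hpad, hk, foldA_chunks]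
  dsimp only
  -- reduce B's pyRange-with-step-5 to a map over List.range k
  rw [PySem.List.pyRange_of_pos 0 ((5 * k : Nat) : Int) (by norm_num)]
  have hkk : (if (0 : Int) < ((5 * k : Nat) : Int) then ((((5 * k : Nat) : Int) - 0 + 5 - 1) / 5).toNat else 0) = k := by
    have h1 : (((5 * k : Nat) : Int) - 0 + 5 - 1) = ((5 * k + 4 : Nat) : Int) := by push_cast; ring
    rw [h1, show (5 : Int) = ((5 : Nat) : Int) from rfl, ← Int.natCast_div]
    split_ifs with h
    · rw [Int.toNat_natCast]
      simp only [Int.natCast_pos] at h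
      omega
    · simp only [Int.natCast_pos, Nat.pos_iff_ne_zero] at h
      omega
  rw [hkk, List.map_map]
  apply List.ext_getElem
  · simp
  intro r h1 h2
  simp only [List.getElem_map, List.getElem_range, Function.comp]
  have hr : r < k := by simpa using h1
  have hcast : (0 : Int) + 5 * (r : Int) = ((5 * r : Nat) : Int) := by push_cast; ring
  rw [hcast]
  have hs := PySem.List.slice_natCast_add
    (List.map (fun i => if i < n then moonCell ms i else "-") (List.range (5 * k))) (5 * r) 5
  rw [show ((5 : Nat) : Int) = (5 : Int) from rfl] at hs
  rw [hs, slice_map_range _ k r hr]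

-- ===== VERDICT (by name: the statement is the Claim_ definition above) =====
theorem list_moons_spec : Claim_equal_list_moons := by
  intro t_planet _ _
  unfold Spec_list_moons list_moons list_moons_alt
  match h : t_planet.lookup "moons" with
  | none => rfl
  | some none => rfl
  | some (some ms) => simpa using branch_eq ms
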